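-- pv_equiv track=rewrite | github.com/rintaronishiyama/steinertree | python_sketchLS/development.py | bfs_sketch
-- ===== SOURCE A (Python) =====
-- def bfs_sketch(source, sketch_of_source) :
--     visited_nodes = [source]
--     len_list = []
--     for i in sketch_of_source :
--         len_list.append(len(i))
--     max_len = max(len_list)
--     for i in range(1, max_len) :
--         for j in range(len(sketch_of_source)) :
--             if (i + 1) > len(sketch_of_source[j]) :
--                 continue
--             if not sketch_of_source[j][i] in visited_nodes :
--                 visited_nodes.append(sketch_of_source[j][i])
--
--     return visited_nodes
-- ===== SOURCE B (Python) =====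
-- def bfs_sketch(source, sketch_of_source):
--     out = [source]
--     seen = {source}
--     tails = [p[1:] for p in sketch_of_source]
--     while True:
--         tails = [t for t in tails if t]
--         if not tails:
--             return out
--         for t in tails:
--             if t[0] not in seen:
--                 seen.add(t[0])
--                 out.append(t[0])
--         tails = [t[1:] for t in tails]
-- ===== Notes on version B (the rewrite author's own statement) =====
-- stated objective: faster
-- what changed: Replaces A's index-driven nested loops (layer index i, path index j, linear membership scan of the growing visited list) by repeatedly peeling the head of each path's tail list, filtering out exhausted tails as the loop goes (no indices, no max-length computation), with a hash set for O(1) dedup.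
import Mathlib
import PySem

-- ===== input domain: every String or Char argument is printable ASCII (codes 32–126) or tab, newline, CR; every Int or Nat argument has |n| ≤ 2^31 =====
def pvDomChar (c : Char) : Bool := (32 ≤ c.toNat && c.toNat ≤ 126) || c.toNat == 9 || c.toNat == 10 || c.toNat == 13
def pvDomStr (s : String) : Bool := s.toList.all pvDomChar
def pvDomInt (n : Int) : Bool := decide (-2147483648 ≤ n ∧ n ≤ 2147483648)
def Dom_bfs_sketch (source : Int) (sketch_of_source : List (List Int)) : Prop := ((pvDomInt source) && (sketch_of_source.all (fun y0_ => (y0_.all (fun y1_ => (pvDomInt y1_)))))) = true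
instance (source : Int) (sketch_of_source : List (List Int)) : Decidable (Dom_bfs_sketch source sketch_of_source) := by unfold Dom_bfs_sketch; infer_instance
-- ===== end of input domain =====

-- B replaces A's index-driven nested loops (layer index, path index, linear membership
-- scan of the growing visited list) by peeling the head of each path's tail list layer
-- by layer, filtering out exhausted tails, with a set for the dedup (objective: faster).

-- ===== PORT A =====
def bfs_sketch (source : Int) (sketch_of_source : List (List Int)) : List Int :=
  let visited_nodes : List Int := [source]
  let len_list : List Int :=
    sketch_of_source.foldl (fun acc i => acc ++ [(i.length : Int)]) []
  let max_len : Int := (PySem.List.max? len_list (fun x => x)).getD 0   -- Pre_ excludes the empty list, where Python's max([]) raises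
  (PySem.List.pyRange 1 max_len 1).foldl (fun vis i =>
    (PySem.List.pyRange 0 (PySem.List.len sketch_of_source) 1).foldl (fun vis j =>
      if (i + 1) > ((PySem.List.pyGetD sketch_of_source j []).length : Int) then vis
      else if PySem.List.pyGetD (PySem.List.pyGetD sketch_of_source j []) i 0 ∈ vis then vis
      else vis ++ [PySem.List.pyGetD (PySem.List.pyGetD sketch_of_source j []) i 0]) vis) visited_nodes

-- ===== PORT B =====
-- termination measure fact for the peel loop (cited by the port's decreasing_by)
theorem pvPeelAux (tails : List (List Int)) :
    (((tails.filter (fun t => !t.isEmpty)).map (fun t => t.tail)).map List.length).sum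
      + (tails.filter (fun t => !t.isEmpty)).length ≤ (tails.map List.length).sum := by
  induction tails with
  | nil => simp
  | cons t rest ih =>
      cases t with
      | nil => simpa using ih
      | cons a u =>
          simp only [List.filter_cons, List.isEmpty_cons, Bool.not_false, if_pos,
            List.map_cons, List.sum_cons, List.length_cons, List.tail_cons]
          omega

theorem pvPeelMeasure (tails : List (List Int))
    (h : tails.filter (fun t => !t.isEmpty) ≠ []) :
    (((tails.filter (fun t => !t.isEmpty)).map (fun t => t.tail)).map List.length).sum
      < (tails.map List.length).sum := by
  have := pvPeelAux tails
  have hlen : 0 < (tails.filter (fun t => !t.isEmpty)).length := List.length_pos_of_ne_nil h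
  omega

-- tails = [t[1:] for t in ts] (the slice strips each head)
def peelNext (ts : List (List Int)) : List (List Int) :=
  ts.map (fun t => PySem.List.slice t (some 1) none)

-- the while-loop of Source B: filter the nonempty tails, add their heads, recurse on their tails
def bfsPeel (tails : List (List Int)) (seen : PySem.Set Int) (out : List Int) : List Int :=
  if h : tails.filter (fun t => !t.isEmpty) = [] then out
  else
    let ts := tails.filter (fun t => !t.isEmpty)
    let p := ts.foldl
      (fun (p : PySem.Set Int × List Int) t =>
        if PySem.Set.contains p.1 (PySem.List.pyGetD t 0 0) then p
        else (PySem.Set.add p.1 (PySem.List.pyGetD t 0 0), p.2 ++ [PySem.List.pyGetD t 0 0]))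
      (seen, out)
    bfsPeel (peelNext ts) p.1 p.2
termination_by (tails.map List.length).sum
decreasing_by
  simp only [peelNext, PySem.List.slice_from_one, List.unattach_filter, List.unattach_attach]
  exact pvPeelMeasure tails h

def bfs_sketch_alt (source : Int) (sketch_of_source : List (List Int)) : List Int :=
  let out : List Int := [source]
  let seen : PySem.Set Int := PySem.Set.ofList [source]
  let tails : List (List Int) :=
    sketch_of_source.map (fun p => PySem.List.slice p (some 1) none)
  bfsPeel tails seen out

-- ===== PRECONDITION & SPEC =====
-- Pre_ excludes the empty sketch list, on which Python's A raises ValueError (max of an empty sequence).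
def Pre_bfs_sketch (source : Int) (sketch_of_source : List (List Int)) : Prop :=
  sketch_of_source ≠ []
instance (source : Int) (sketch_of_source : List (List Int)) : Decidable (Pre_bfs_sketch source sketch_of_source) := by unfold Pre_bfs_sketch; infer_instance
def pvWitness_bfs_sketch : Int × List (List Int) := (1, [[1, 2, 3], [1, 4]])

def Spec_bfs_sketch (source : Int) (sketch_of_source : List (List Int)) (out : List Int) : Prop := out = bfs_sketch_alt source sketch_of_source
instance (source : Int) (sketch_of_source : List (List Int)) (out : List Int) : Decidable (Spec_bfs_sketch source sketch_of_source out) := by unfold Spec_bfs_sketch; infer_instance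

-- ===== CLAIM (what is proved, stated in full; the proofs are below) =====
def Claim_equal_bfs_sketch : Prop := ∀ (source : Int) (sketch_of_source : List (List Int)), Dom_bfs_sketch source sketch_of_source → Pre_bfs_sketch source sketch_of_source → Spec_bfs_sketch source sketch_of_source (bfs_sketch source sketch_of_source)
-- ===== LEMMAS AND PROOFS =====

-- the stream of candidates the peel loop inspects, layer by layer
def tailsNext (ts : List (List Int)) : List (List Int) := ts.map (fun t => t.tail)

def peelCand (tails : List (List Int)) : List Int :=
  if h : tails.filter (fun t => !t.isEmpty) = [] then []
  else (tails.filter (fun t => !t.isEmpty)).map (fun t => t.headD 0)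
    ++ peelCand (tailsNext (tails.filter (fun t => !t.isEmpty)))
termination_by (tails.map List.length).sum
decreasing_by
  simp only [tailsNext, List.unattach_filter, List.unattach_attach]
  exact pvPeelMeasure tails h

-- A's guarded insertion over the path list is a Set.add fold over the filtered candidates.
theorem foldl_guard_eq_filterMap_add (i : Int) (sos : List (List Int)) (vis : List Int) :
    sos.foldl (fun vis pj =>
        if (i + 1) > (pj.length : Int) then vis
        else if PySem.List.pyGetD pj i 0 ∈ vis then vis else vis ++ [PySem.List.pyGetD pj i 0]) vis
      = (sos.filterMap (fun p =>
          if i < (p.length : Int) then some (PySem.List.pyGetD p i 0) else none)).foldl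
          PySem.Set.add vis := by
  induction sos generalizing vis with
  | nil => rfl
  | cons p ps ih =>
      by_cases h : i < (p.length : Int)
      · have h' : ¬ ((i + 1) > (p.length : Int)) := by omega
        simp only [List.foldl_cons, List.filterMap_cons, if_pos h, if_neg h', ih]
        congr 1
        simp [PySem.Set.add, PySem.Set.contains]
      · have h' : (i + 1) > (p.length : Int) := by omega
        simp only [List.foldl_cons, List.filterMap_cons, if_pos h', if_neg h, ih]

-- The outer layer loop of inner Set.add folds is one fold over the flattened candidates.
theorem foldl_foldl_eq_foldl_flatMap {α β γ : Type} (g : α → List γ)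
    (step : β → γ → β) (l : List α) (init : β) :
    l.foldl (fun acc i => (g i).foldl step acc) init = (l.flatMap g).foldl step init := by
  induction l generalizing init with
  | nil => rfl
  | cons x xs ih => simp [List.foldl_cons, List.flatMap_cons, List.foldl_append, ih]

-- B's paired (seen, out) fold, started on a synced pair, is a Set.add fold.
theorem foldl_pair_sync (ts : List (List Int)) (s : List Int) :
    ts.foldl
      (fun (p : PySem.Set Int × List Int) t =>
        if PySem.Set.contains p.1 (PySem.List.pyGetD t 0 0) then p
        else (PySem.Set.add p.1 (PySem.List.pyGetD t 0 0), p.2 ++ [PySem.List.pyGetD t 0 0]))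
      (s, s)
      = ((ts.map (fun t => PySem.List.pyGetD t 0 0)).foldl PySem.Set.add s,
         (ts.map (fun t => PySem.List.pyGetD t 0 0)).foldl PySem.Set.add s) := by
  induction ts generalizing s with
  | nil => rfl
  | cons t rest ih =>
      simp only [List.foldl_cons, List.map_cons]
      by_cases h : PySem.Set.contains s (PySem.List.pyGetD t 0 0)
      · rw [if_pos h]
        have hadd : PySem.Set.add s (PySem.List.pyGetD t 0 0) = s := by
          unfold PySem.Set.add
          rw [if_pos h]
        rw [hadd]
        exact ih s
      · rw [if_neg h]
        have hadd : PySem.Set.add s (PySem.List.pyGetD t 0 0) = s ++ [PySem.List.pyGetD t 0 0] := by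
          unfold PySem.Set.add
          rw [if_neg h]
        rw [hadd]
        exact ih _

-- heads of the filtered tails, as A's layer comprehension produces them
theorem heads_filterMap (tails : List (List Int)) :
    tails.filterMap (fun t => if 0 < t.length then some (t.getD 0 0) else none)
      = (tails.filter (fun t => !t.isEmpty)).map (fun t => t.headD 0) := by
  induction tails with
  | nil => rfl
  | cons t rest ih => cases t <;> simpa using ih

-- shifting the layer index down by one moves the scan to the tails
theorem shift_filterMap (k : Nat) (l : List (List Int)) :
    l.filterMap (fun p => if k + 1 < p.length then some (p.getD (k + 1) 0) else none)
      = (l.map (fun t => t.tail)).filterMap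
          (fun t => if k < t.length then some (t.getD k 0) else none) := by
  induction l with
  | nil => rfl
  | cons p rest ih =>
      cases p with
      | nil => simpa using ih
      | cons a u =>
          by_cases h : k < u.length
          · simpa [Nat.succ_lt_succ_iff, h] using ih
          · simpa [Nat.succ_lt_succ_iff, h] using ih

-- dropping the empty tails before scanning a layer does not change the scan results
theorem filterMap_tails_filter (k : Nat) (l : List (List Int)) :
    (l.map (fun t => t.tail)).filterMap
        (fun t => if k < t.length then some (t.getD k 0) else none)
      = ((l.filter (fun t => !t.isEmpty)).map (fun t => t.tail)).filterMap
        (fun t => if k < t.length then some (t.getD k 0) else none) := by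
  induction l with
  | nil => rfl
  | cons t rest ih =>
      cases t with
      | nil => simpa using ih
      | cons a v =>
          simp only [List.map_cons, List.tail_cons, List.filter_cons, List.isEmpty_cons,
            Bool.not_false, if_true, List.filterMap_cons]
          rw [ih]

-- the flattened layer-by-layer candidate list IS the peel stream
theorem range_flatMap_eq_peelCand (n : Nat) (tails : List (List Int))
    (hb : ∀ t ∈ tails, t.length ≤ n) :
    (List.range n).flatMap
        (fun k => tails.filterMap (fun t => if k < t.length then some (t.getD k 0) else none))
      = peelCand tails := by
  induction n generalizing tails with
  | zero =>
      have hts : tails.filter (fun t => !t.isEmpty) = [] := by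
        rw [List.filter_eq_nil_iff]
        intro t ht
        have h0 : t = [] := List.eq_nil_of_length_eq_zero (Nat.le_zero.mp (hb t ht))
        simp [h0]
      rw [peelCand.eq_def]
      simp [hts]
  | succ n ih =>
      by_cases hts : tails.filter (fun t => !t.isEmpty) = []
      · have hall : ∀ t ∈ tails, t = [] := by
          intro t ht
          by_contra hne
          have hmem : t ∈ tails.filter (fun t => !t.isEmpty) := by
            rw [List.mem_filter]
            exact ⟨ht, by simpa [List.isEmpty_iff] using hne⟩
          simp [hts] at hmem
        rw [peelCand.eq_def]
        simp only [hts, dif_pos]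
        rw [List.flatMap_eq_nil_iff]
        intro k _
        rw [List.filterMap_eq_nil_iff]
        intro t ht
        rw [hall t ht]
        simp
      · rw [peelCand.eq_def]
        simp only [hts, dif_neg, not_false_iff, tailsNext]
        rw [List.range_succ_eq_map, List.flatMap_cons, List.flatMap_map]
        congr 1
        · exact heads_filterMap tails
        · have hfun : (fun k => tails.filterMap
              (fun t => if Nat.succ k < t.length then some (t.getD (Nat.succ k) 0) else none))
              = (fun k => ((tails.filter (fun t => !t.isEmpty)).map (fun t => t.tail)).filterMap
                  (fun t => if k < t.length then some (t.getD k 0) else none)) := by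
            funext k
            show tails.filterMap
                (fun t => if k + 1 < t.length then some (t.getD (k + 1) 0) else none) = _
            rw [shift_filterMap k tails, filterMap_tails_filter k tails]
          rw [hfun]
          apply ih
          intro t ht
          rcases List.mem_map.mp ht with ⟨u, hu, rfl⟩
          have hu' : u ∈ tails := (List.mem_filter.mp hu).1
          have hlen := hb u hu'
          cases u with
          | nil => simp
          | cons a v =>
              simp only [List.length_cons] at hlen
              simpa using Nat.lt_succ_iff.mp (Nat.lt_succ_of_le hlen) |> fun h => by omega

-- the peel loop on a synced (seen, out) pair is a Set.add fold over the peel stream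
theorem bfsPeel_eq_foldl (tails : List (List Int)) (s : List Int) :
    bfsPeel tails s s = (peelCand tails).foldl PySem.Set.add s := by
  generalize hn : (tails.map List.length).sum = n
  induction n using Nat.strong_induction_on generalizing tails s with
  | _ n ih =>
      rw [bfsPeel.eq_def, peelCand.eq_def]
      by_cases hts : tails.filter (fun t => !t.isEmpty) = []
      · simp [hts]
      · simp only [hts, dif_neg, not_false_iff]
        rw [foldl_pair_sync]
        have hm : ((peelNext (tails.filter (fun t => !t.isEmpty))).map List.length).sum < n := by
          rw [← hn]
          simpa [peelNext, PySem.List.slice_from_one] using pvPeelMeasure tails hts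
        rw [ih _ hm _ _ rfl]
        simp only [peelNext, tailsNext, PySem.List.slice_from_one]
        rw [List.foldl_append]
        congr 2
        -- heads via pyGetD 0 = headD on the filtered (nonempty) tails
        apply List.map_congr_left
        intro t ht
        have : t ≠ [] := by
          have := (List.mem_filter.mp ht).2
          simpa [List.isEmpty_iff] using this
        cases t with
        | nil => exact absurd rfl this
        | cons a u => simp [PySem.List.pyGetD]

theorem bfs_sketch_spec : Claim_equal_bfs_sketch := by
  intro source sos _hdom hpre
  unfold Spec_bfs_sketch bfs_sketch bfs_sketch_alt
  simp only [PySem.List.foldl_append_singleton_eq_map, List.nil_append]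
  -- A's nested loops as one Set.add fold over the flattened Int-indexed candidates
  have hfun : (fun (vis : List Int) (i : Int) =>
      (PySem.List.pyRange 0 (PySem.List.len sos) 1).foldl (fun vis j =>
        if (i + 1) > ((PySem.List.pyGetD sos j []).length : Int) then vis
        else if PySem.List.pyGetD (PySem.List.pyGetD sos j []) i 0 ∈ vis then vis
        else vis ++ [PySem.List.pyGetD (PySem.List.pyGetD sos j []) i 0]) vis)
      = (fun (vis : List Int) (i : Int) =>
        (sos.filterMap (fun p =>
          if i < (p.length : Int) then some (PySem.List.pyGetD p i 0) else none)).foldl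
          PySem.Set.add vis) := by
    funext vis i
    simp only [PySem.List.len_eq]
    rw [PySem.List.foldl_pyRange_zero_pyGetD' sos ([] : List Int)
      (fun vis pj =>
        if (i + 1) > (pj.length : Int) then vis
        else if PySem.List.pyGetD pj i 0 ∈ vis then vis
          else vis ++ [PySem.List.pyGetD pj i 0]) vis]
    exact foldl_guard_eq_filterMap_add i sos vis
  rw [hfun, foldl_foldl_eq_foldl_flatMap]
  -- B's peel loop as a Set.add fold over the peel stream
  have hofl : PySem.Set.ofList [source] = [source] := by rfl
  rw [hofl, bfsPeel_eq_foldl]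
  congr 1
  -- the two candidate streams coincide
  simp only [PySem.List.slice_from_one]
  set M : Int := (PySem.List.max? (sos.map (fun i => (i.length : Int))) fun x => x).getD 0 with hM
  have hmax : ∀ p ∈ sos, (p.length : Int) ≤ M := by
    intro p hp
    have hmem : (p.length : Int) ∈ sos.map (fun i => (i.length : Int)) :=
      List.mem_map.mpr ⟨p, hp, rfl⟩
    cases hcase : PySem.List.max? (sos.map (fun i => (i.length : Int))) (fun x => x) with
    | none =>
        rw [PySem.List.max?_eq_none_iff] at hcase
        rw [hcase] at hmem
        simp at hmem
    | some m =>
        have hle := PySem.List.max?_isMax hcase _ hmem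
        rw [hM, hcase]
        simpa using hle
  -- convert A's Int-indexed candidate stream to the Nat-indexed one over the tails
  rw [PySem.List.pyRange_one, List.flatMap_map]
  have hstep : (fun k : Nat => sos.filterMap (fun p =>
        if (1 : Int) + k < (p.length : Int) then some (PySem.List.pyGetD p (1 + (k : Int)) 0) else none))
      = (fun k : Nat => (sos.map (fun t => t.tail)).filterMap
          (fun t => if k < t.length then some (t.getD k 0) else none)) := by
    funext k
    have h1 : ((1 : Int) + (k : Int)) = (((k + 1 : Nat) : Int)) := by push_cast; ring
    rw [show (fun p : List Int =>
        if (1 : Int) + k < (p.length : Int) then some (PySem.List.pyGetD p (1 + (k : Int)) 0) else none)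
      = (fun p : List Int =>
        if k + 1 < p.length then some (p.getD (k + 1) 0) else none) from ?_, shift_filterMap k sos]
    funext p
    rw [h1, PySem.List.pyGetD_natCast]
    congr 1
    simp only [eq_iff_iff]
    exact_mod_cast Iff.rfl
  rw [hstep]
  have hbound : ∀ t ∈ sos.map (fun t : List Int => t.tail), t.length ≤ (M - 1).toNat := by
    intro t ht
    rcases List.mem_map.mp ht with ⟨p, hp, rfl⟩
    have h1 := hmax p hp
    have h2 : p.tail.length = p.length - 1 := by cases p <;> simp
    omega
  exact range_flatMap_eq_peelCand (M - 1).toNat (sos.map (fun t => t.tail)) hbound
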